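-- pv_equiv track=rewrite | github.com/JXIong15/aoc2024 | day2/day2.py | find_safe_reports
-- ===== SOURCE A (Python) =====
-- def check_rule_1(report):
--     for i in range(len(report)-1):
--         # check difference
--         difference = abs(report[i] - report[i+1])
--         if difference > 3 or difference < 1:
--             return False
--     return True
--
-- def check_rule_2(report):
--     is_decreasing = False
--     is_increasing = False
--     for i in range(len(report) - 1):
--         if report[i] < report[i + 1]:
--             is_increasing = True
--         elif report[i] > report[i + 1]:
--             is_decreasing = True
--     return not (is_increasing and is_decreasing)
--
-- def find_safe_reports(reports_list):
--     safe_reports_count = 0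
--     second_chance_lists = []
--     for report in reports_list:
--         if check_rule_1(report) and check_rule_2(report):
--             safe_reports_count += 1
--         else:
--             second_chance_lists.append(report)
--     return safe_reports_count, second_chance_lists
-- ===== SOURCE B (Python) =====
-- def find_safe_reports(reports_list):
--     safe_reports_count = 0
--     second_chance_lists = []
--     for report in reports_list:
--         s = sorted(report)
--         ordered = report == s or report == s[::-1]
--         if ordered and all(1 <= y - x <= 3 for x, y in zip(s, s[1:])):
--             safe_reports_count += 1
--         else:
--             second_chance_lists.append(report)
--     return safe_reports_count, second_chance_lists
-- ===== Notes on version B (the rewrite author's own statement) =====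
-- stated objective: alternative
-- what changed: B judges each report by sorting it: safe iff the report equals its sorted (or reverse-sorted) copy and the sorted copy's adjacent gaps all lie in [1,3], replacing A's two flag-carrying adjacent-pair scans (abs-difference rule + increasing/decreasing flags).
import Mathlib
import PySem

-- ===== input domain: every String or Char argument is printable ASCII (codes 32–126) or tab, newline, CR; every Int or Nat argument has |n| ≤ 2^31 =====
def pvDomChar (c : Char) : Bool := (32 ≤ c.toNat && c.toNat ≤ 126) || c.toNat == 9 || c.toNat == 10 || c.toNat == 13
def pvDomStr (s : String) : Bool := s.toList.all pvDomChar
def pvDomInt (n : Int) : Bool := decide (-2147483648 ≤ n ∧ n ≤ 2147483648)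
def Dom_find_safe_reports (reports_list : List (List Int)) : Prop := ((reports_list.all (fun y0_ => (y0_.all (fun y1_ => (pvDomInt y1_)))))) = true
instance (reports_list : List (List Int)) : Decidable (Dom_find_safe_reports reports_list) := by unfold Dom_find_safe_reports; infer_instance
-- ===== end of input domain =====

-- B judges each report by sorting it (safe iff the report equals its sorted or reverse-sorted copy and the
-- sorted copy's adjacent gaps lie in [1,3]) instead of A's two flag-carrying adjacent-pair scans; alternative algorithm, not faster.


-- ===== PORT A =====
-- loop over i in range(len(report)-1) comparing report[i] with report[i+1], with early return False:
-- transcribed as structural recursion over successive adjacent pairs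
def check_rule_1 : List Int → Bool
  | a :: b :: t => if 3 < |a - b| ∨ |a - b| < 1 then false else check_rule_1 (b :: t)
  | _ => true

-- the flag-carrying loop of check_rule_2 (is_increasing / is_decreasing updated per adjacent pair)
def rule2_loop (is_decreasing is_increasing : Bool) : List Int → Bool × Bool
  | a :: b :: t =>
      if a < b then rule2_loop is_decreasing true (b :: t)
      else if b < a then rule2_loop true is_increasing (b :: t)
      else rule2_loop is_decreasing is_increasing (b :: t)
  | _ => (is_decreasing, is_increasing)

def check_rule_2 (report : List Int) : Bool :=
  let f := rule2_loop false false report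
  !(f.2 && f.1)

def find_safe_reports (reports_list : List (List Int)) : Int × List (List Int) :=
  reports_list.foldl
    (fun acc report =>
      if check_rule_1 report && check_rule_2 report then (acc.1 + 1, acc.2)
      else (acc.1, acc.2 ++ [report]))
    (0, [])

-- ===== PORT B =====
-- s = sorted(report); ordered = report == s or report == s[::-1]; safe = ordered and all gaps of s in [1,3]
def pvSafe (report : List Int) : Bool :=
  let s := PySem.List.sorted report (fun x => x) false
  let ordered := report == s || report == s.reverse
  ordered && (s.zip (s.drop 1)).all (fun p => decide (1 ≤ p.2 - p.1 ∧ p.2 - p.1 ≤ 3))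

def find_safe_reports_alt (reports_list : List (List Int)) : Int × List (List Int) :=
  reports_list.foldl
    (fun acc report =>
      if pvSafe report then (acc.1 + 1, acc.2)
      else (acc.1, acc.2 ++ [report]))
    (0, [])

-- ===== PRECONDITION & SPEC =====
def Spec_find_safe_reports (reports_list : List (List Int)) (out : Int × List (List Int)) : Prop := out = find_safe_reports_alt reports_list
instance (reports_list : List (List Int)) (out : Int × List (List Int)) : Decidable (Spec_find_safe_reports reports_list out) := by unfold Spec_find_safe_reports; infer_instance

-- ===== CLAIM (what is proved, stated in full; the proofs are below) =====
def Claim_equal_find_safe_reports : Prop := ∀ (reports_list : List (List Int)), Dom_find_safe_reports reports_list → Spec_find_safe_reports reports_list (find_safe_reports reports_list)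

-- ===== LEMMAS AND PROOFS =====

-- the consecutive-difference list (proof device)
def pvDiffs (r : List Int) : List Int := List.zipWith (fun a b => b - a) r (r.drop 1)

lemma pvDiffs_cons (a b : Int) (t : List Int) :
    pvDiffs (a :: b :: t) = (b - a) :: pvDiffs (b :: t) := rfl

-- check_rule_1 holds iff every difference has absolute value in [1,3]
lemma rule1_iff (r : List Int) :
    check_rule_1 r = true ↔ ∀ x ∈ pvDiffs r, (1 ≤ x ∧ x ≤ 3) ∨ (-3 ≤ x ∧ x ≤ -1) := by
  match r with
  | [] => simp [check_rule_1, pvDiffs]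
  | [a] => simp [check_rule_1, pvDiffs]
  | a :: b :: t =>
    have ih := rule1_iff (b :: t)
    by_cases h : 3 < |a - b| ∨ |a - b| < 1
    · have hh : ¬ ((1 ≤ b - a ∧ b - a ≤ 3) ∨ (-3 ≤ b - a ∧ b - a ≤ -1)) := by
        rcases abs_cases (a - b) with ⟨he, _⟩ | ⟨he, _⟩ <;> rcases h with h | h <;> omega
      rw [show check_rule_1 (a :: b :: t)
            = if 3 < |a - b| ∨ |a - b| < 1 then false else check_rule_1 (b :: t) from rfl,
        if_pos h]
      simp only [Bool.false_eq_true, false_iff, not_forall]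
      exact ⟨b - a, by rw [pvDiffs_cons]; exact List.mem_cons_self, hh⟩
    · have hh : (1 ≤ b - a ∧ b - a ≤ 3) ∨ (-3 ≤ b - a ∧ b - a ≤ -1) := by
        push Not at h
        rcases abs_cases (a - b) with ⟨he, _⟩ | ⟨he, _⟩ <;> omega
      rw [show check_rule_1 (a :: b :: t)
            = if 3 < |a - b| ∨ |a - b| < 1 then false else check_rule_1 (b :: t) from rfl,
        if_neg h, ih]
      constructor
      · intro hall x hx
        rw [pvDiffs_cons, List.mem_cons] at hx
        rcases hx with rfl | hx
        · exact hh
        · exact hall x hx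
      · intro hall x hx
        exact hall x (by rw [pvDiffs_cons, List.mem_cons]; exact Or.inr hx)

-- the flag loop records "some decrease seen" / "some increase seen"
lemma rule2_loop_char (dec inc : Bool) (r : List Int) :
    rule2_loop dec inc r =
      (dec || (pvDiffs r).any (fun x => decide (x < 0)),
       inc || (pvDiffs r).any (fun x => decide (0 < x))) := by
  match r with
  | [] => simp [rule2_loop, pvDiffs]
  | [a] => simp [rule2_loop, pvDiffs]
  | a :: b :: t =>
    by_cases h1 : a < b
    · rw [show rule2_loop dec inc (a :: b :: t) = rule2_loop dec true (b :: t) by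
        simp [rule2_loop, h1], rule2_loop_char]
      have hx : ¬ (b - a < 0) := by omega
      have hy : (0 : Int) < b - a := by omega
      simp [pvDiffs, hx, h1]
    · by_cases h2 : b < a
      · rw [show rule2_loop dec inc (a :: b :: t) = rule2_loop true inc (b :: t) by
          simp [rule2_loop, h1, h2], rule2_loop_char]
        have hx : b - a < 0 := by omega
        simp [pvDiffs, hx, h1]
      · rw [show rule2_loop dec inc (a :: b :: t) = rule2_loop dec inc (b :: t) by
          simp [rule2_loop, h1, h2], rule2_loop_char]
        have hx : b - a = 0 := by omega
        simp [pvDiffs, hx]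

-- A's combined check as a disjunction over the difference list
lemma checksA_iff (r : List Int) :
    (check_rule_1 r && check_rule_2 r) = true ↔
      (∀ x ∈ pvDiffs r, 1 ≤ x ∧ x ≤ 3) ∨ (∀ x ∈ pvDiffs r, -3 ≤ x ∧ x ≤ -1) := by
  unfold check_rule_2
  rw [rule2_loop_char]
  simp only [Bool.false_or, Bool.and_eq_true, rule1_iff, Bool.not_eq_true',
    Bool.and_eq_false_iff, List.any_eq_false, decide_eq_true_iff, not_lt]
  constructor
  · rintro ⟨hall, hno⟩
    by_cases hp : ∀ y ∈ pvDiffs r, 1 ≤ y ∧ y ≤ 3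
    · exact Or.inl hp
    · right
      push Not at hp
      obtain ⟨y0, hy0, hy0p⟩ := hp
      intro y hy
      rcases hall y hy with h | h
      · exfalso
        have hy0n : -3 ≤ y0 ∧ y0 ≤ -1 := by rcases hall y0 hy0 with h' | h' <;> omega
        rcases hno with hno | hno
        · have c1 := hno y hy; have c2 := hno y0 hy0; omega
        · have c1 := hno y hy; have c2 := hno y0 hy0; omega
      · exact h
  · rintro (h | h)
    · exact ⟨fun y hy => Or.inl (h y hy), Or.inr (fun y hy => by have := h y hy; omega)⟩
    · exact ⟨fun y hy => Or.inr (h y hy), Or.inl (fun y hy => by have := h y hy; omega)⟩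

-- ∀-over-differences is an adjacent chain
lemma diffs_iff_chain (P : Int → Prop) (r : List Int) :
    (∀ x ∈ pvDiffs r, P x) ↔ List.IsChain (fun a b => P (b - a)) r := by
  match r with
  | [] => simp [pvDiffs]
  | [a] => simp [pvDiffs]
  | a :: b :: t =>
    rw [pvDiffs_cons, List.isChain_cons_cons]
    have ih := diffs_iff_chain P (b :: t)
    simp only [List.mem_cons]
    constructor
    · intro h
      exact ⟨h (b - a) (Or.inl rfl), ih.mp (fun x hx => h x (Or.inr hx))⟩
    · rintro ⟨h1, h2⟩ x hx
      rcases hx with rfl | hx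
      · exact h1
      · exact ih.mpr h2 x hx

-- B's gap scan over a list s is the same chain on s
lemma gaps_iff_chain (s : List Int) :
    ((s.zip (s.drop 1)).all (fun p => decide (1 ≤ p.2 - p.1 ∧ p.2 - p.1 ≤ 3)) = true)
      ↔ List.IsChain (fun a b => 1 ≤ b - a ∧ b - a ≤ 3) s := by
  match s with
  | [] => simp
  | [a] => simp
  | a :: b :: t =>
    have ih := gaps_iff_chain (b :: t)
    rw [List.isChain_cons_cons]
    simp only [List.drop_succ_cons, List.drop_zero, List.zip_cons_cons, List.all_cons,
      Bool.and_eq_true, decide_eq_true_iff] at *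
    rw [ih]

-- an upward chain is strictly pairwise-increasing
lemma chain_up_pairwise {r : List Int} (h : List.IsChain (fun a b => 1 ≤ b - a ∧ b - a ≤ 3) r) :
    r.Pairwise (· < ·) := by
  have h' : List.IsChain (fun a b : Int => a < b) r := h.imp (fun hab => by omega)
  exact List.isChain_iff_pairwise.mp h'

-- combined check of A equals B's sorted-copy judgement
lemma checks_eq_safe (r : List Int) : (check_rule_1 r && check_rule_2 r) = pvSafe r := by
  rw [Bool.eq_iff_iff, checksA_iff]
  unfold pvSafe
  simp only [Bool.and_eq_true, Bool.or_eq_true, beq_iff_eq, gaps_iff_chain]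
  constructor
  · rintro (h | h)
    · have hc := (diffs_iff_chain _ r).mp h
      have hs : PySem.List.sorted r (fun x => x) = r :=
        PySem.List.sorted_eq_of_perm_of_pairwise_lt r r (fun x => x)
          (List.Perm.refl r) (chain_up_pairwise hc)
      rw [hs]
      exact ⟨Or.inl rfl, hc⟩
    · have hc : List.IsChain (fun a b => 1 ≤ b - a ∧ b - a ≤ 3) r.reverse := by
        rw [List.isChain_reverse]
        exact ((diffs_iff_chain _ r).mp h).imp (fun hab => by omega)
      have hs : PySem.List.sorted r (fun x => x) = r.reverse :=
        PySem.List.sorted_eq_of_perm_of_pairwise_lt r r.reverse (fun x => x)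
          (List.reverse_perm r) (chain_up_pairwise hc)
      rw [hs, List.reverse_reverse]
      exact ⟨Or.inr rfl, hc⟩
  · rintro ⟨h1 | h1, h2⟩
    · left
      exact (diffs_iff_chain _ r).mpr (h1 ▸ h2)
    · right
      have hrev : List.IsChain (fun a b => 1 ≤ b - a ∧ b - a ≤ 3)
          (PySem.List.sorted r (fun x => x)) := h2
      rw [← List.reverse_reverse (PySem.List.sorted r (fun x => x)), ← h1,
        List.isChain_reverse] at hrev
      refine (diffs_iff_chain (fun x => -3 ≤ x ∧ x ≤ -1) r).mpr ?_
      exact hrev.imp (fun hab => by omega)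

-- ===== VERDICT (by name: the statement is the Claim_ definition above) =====
theorem find_safe_reports_spec : Claim_equal_find_safe_reports := by
  intro reports_list _
  show find_safe_reports reports_list = find_safe_reports_alt reports_list
  unfold find_safe_reports find_safe_reports_alt
  congr 1
  funext acc report
  rw [checks_eq_safe]
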